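-- pv_equiv track=rewrite | github.com/Fabrizio-Caruso/CROSS-LIB | src/modules/tiles.py | detect_ysize
-- ===== SOURCE A (Python) =====
-- TARGETS_WITH_YSIZE_6 = {"atari_lynx"}
--
-- TARGETS_WITH_YSIZE_9 = {"comx", "micro", "pecom"}
--
-- TARGETS_WITH_YSIZE_8 = {"comx_ntsc", "micro_ntsc"} # Necessary to avoid comx and micro
--
-- def detect_ysize(target):
--     for target_8_ysize in TARGETS_WITH_YSIZE_8: # Necessary to have this before size 9 for NTSC case (comx, micro)
--         if target.startswith(target_8_ysize):
--             return 8
--     for target_6_ysize in TARGETS_WITH_YSIZE_6: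
--         if target.startswith(target_6_ysize):
--             return 6
--     for target_9_ysize in TARGETS_WITH_YSIZE_9:
--         if target.startswith(target_9_ysize):
--             return 9
--     return 8
-- ===== SOURCE B (Python) =====
-- PREFIX_YSIZE = {
--     "atari_lynx": 6,
--     "comx": 9,
--     "micro": 9,
--     "pecom": 9,
--     "comx_ntsc": 8,
--     "micro_ntsc": 8,
-- }
--
-- def detect_ysize(target):
--     # longest-prefix match: longer prefixes first so NTSC variants win
--     for prefix, size in sorted(PREFIX_YSIZE.items(), key=lambda kv: len(kv[0]), reverse=True):
--         if target.startswith(prefix):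
--             return size
--     return 8
-- ===== Notes on version B (the rewrite author's own statement) =====
-- stated objective: idiomatic
-- what changed: Replaced the three fixed ordered set-scans by a single data-driven longest-prefix match: one prefix-to-size dict whose items are scanned once in descending prefix-length order.
import Mathlib
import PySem

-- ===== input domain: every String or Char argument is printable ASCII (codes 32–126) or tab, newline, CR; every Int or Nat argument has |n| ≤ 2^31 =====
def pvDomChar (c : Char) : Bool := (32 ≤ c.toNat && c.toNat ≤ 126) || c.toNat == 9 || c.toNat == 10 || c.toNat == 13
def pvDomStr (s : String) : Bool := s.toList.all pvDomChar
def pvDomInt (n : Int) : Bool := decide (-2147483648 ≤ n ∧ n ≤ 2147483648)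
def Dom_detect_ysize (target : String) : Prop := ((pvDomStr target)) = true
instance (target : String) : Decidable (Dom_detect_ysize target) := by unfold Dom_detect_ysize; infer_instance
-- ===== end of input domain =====

-- B replaces A's three ordered set-scans by one table scanned in descending prefix-length order (idiomatic; same cost).

-- ===== PORT A =====
-- Python iterates over set literals; within each set at most one prefix can match
-- (distinct first characters), so the result does not depend on the iteration order.
def TARGETS_WITH_YSIZE_6 : PySem.Set String := PySem.Set.ofList ["atari_lynx"]
def TARGETS_WITH_YSIZE_9 : PySem.Set String := PySem.Set.ofList ["comx", "micro", "pecom"]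
def TARGETS_WITH_YSIZE_8 : PySem.Set String := PySem.Set.ofList ["comx_ntsc", "micro_ntsc"]

-- 'for p in s: if target.startswith(p): return r' — early-exit scan of one set
def pyAnyStartswith (target : String) : List String → Bool
  | [] => false
  | p :: rest => if PySem.Str.startswith target p then true else pyAnyStartswith target rest

def detect_ysize (target : String) : Int :=
  if pyAnyStartswith target TARGETS_WITH_YSIZE_8 then 8
  else if pyAnyStartswith target TARGETS_WITH_YSIZE_6 then 6
  else if pyAnyStartswith target TARGETS_WITH_YSIZE_9 then 9
  else 8

-- ===== PORT B =====
def PREFIX_YSIZE : PySem.Dict String Int :=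
  PySem.Dict.ofList [("atari_lynx", 6), ("comx", 9), ("micro", 9), ("pecom", 9), ("comx_ntsc", 8), ("micro_ntsc", 8)]

-- 'for prefix, size in items: if target.startswith(prefix): return size; return 8'
def firstPrefixSize (target : String) : List (String × Int) → Int
  | [] => 8
  | (p, s) :: rest => if PySem.Str.startswith target p then s else firstPrefixSize target rest

def detect_ysize_alt (target : String) : Int :=
  firstPrefixSize target
    (PySem.List.sorted (PySem.Dict.items PREFIX_YSIZE) (fun kv => PySem.Str.len kv.1) true)

-- ===== PRECONDITION & SPEC =====
def Spec_detect_ysize (target : String) (out : Int) : Prop := out = detect_ysize_alt target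
instance (target : String) (out : Int) : Decidable (Spec_detect_ysize target out) := by unfold Spec_detect_ysize; infer_instance

-- ===== CLAIM (what is proved, stated in full; the proofs are below) =====
def Claim_equal_detect_ysize : Prop := ∀ (target : String), Dom_detect_ysize target → Spec_detect_ysize target (detect_ysize target)

-- ===== LEMMAS AND PROOFS =====

-- two prefixes of the same string are comparable; if neither is a prefix of the other
-- they cannot both match
theorem sw_excl (t p q : String) (hp : ¬ p.toList <+: q.toList) (hq : ¬ q.toList <+: p.toList)
    (h1 : PySem.Str.startswith t p = true) : PySem.Str.startswith t q = false := by
  by_contra h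
  have h2 : PySem.Str.startswith t q = true := by
    cases hb : PySem.Str.startswith t q with
    | false => exact absurd hb h
    | true => rfl
  rw [PySem.Str.startswith_eq, PySem.Chars.startswith_iff] at h1 h2
  rcases List.prefix_or_prefix_of_prefix h1 h2 with h | h
  · exact hp h
  · exact hq h

theorem sw_mono (t p q : String) (h : q.toList <+: p.toList)
    (hp : PySem.Str.startswith t p = true) : PySem.Str.startswith t q = true := by
  rw [PySem.Str.startswith_eq, PySem.Chars.startswith_iff] at hp ⊢
  exact h.trans hp

theorem detect_ysize_spec : Claim_equal_detect_ysize := by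
  intro target _
  unfold Spec_detect_ysize detect_ysize detect_ysize_alt
  show _ = firstPrefixSize target
    (PySem.List.sorted (PySem.Dict.items PREFIX_YSIZE) (fun kv => PySem.Str.len kv.1) true)
  have hsorted : PySem.List.sorted (PySem.Dict.items PREFIX_YSIZE) (fun kv => PySem.Str.len kv.1) true
      = [("atari_lynx", 6), ("micro_ntsc", 8), ("comx_ntsc", 8), ("micro", 9), ("pecom", 9), ("comx", 9)] := by decide
  have h6 : TARGETS_WITH_YSIZE_6 = ["atari_lynx"] := by decide
  have h8 : TARGETS_WITH_YSIZE_8 = ["comx_ntsc", "micro_ntsc"] := by decide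
  have h9 : TARGETS_WITH_YSIZE_9 = ["comx", "micro", "pecom"] := by decide
  rw [hsorted, h6, h8, h9]
  simp only [pyAnyStartswith, firstPrefixSize]
  by_cases hcn : PySem.Str.startswith target "comx_ntsc" = true
  · have hc : PySem.Str.startswith target "comx" = true := sw_mono _ _ _ (by decide) hcn
    have h1 := sw_excl target "comx_ntsc" "atari_lynx" (by decide) (by decide) hcn
    have h2 := sw_excl target "comx_ntsc" "micro_ntsc" (by decide) (by decide) hcn
    have h3 := sw_excl target "comx_ntsc" "micro" (by decide) (by decide) hcn
    have h4 := sw_excl target "comx_ntsc" "pecom" (by decide) (by decide) hcn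
    simp_all
  · by_cases hmn : PySem.Str.startswith target "micro_ntsc" = true
    · have hm : PySem.Str.startswith target "micro" = true := sw_mono _ _ _ (by decide) hmn
      have h1 := sw_excl target "micro_ntsc" "atari_lynx" (by decide) (by decide) hmn
      have h2 := sw_excl target "micro_ntsc" "comx" (by decide) (by decide) hmn
      have h3 := sw_excl target "micro_ntsc" "pecom" (by decide) (by decide) hmn
      simp_all
    · by_cases ha : PySem.Str.startswith target "atari_lynx" = true
      · have h1 := sw_excl target "atari_lynx" "comx" (by decide) (by decide) ha
        have h2 := sw_excl target "atari_lynx" "micro" (by decide) (by decide) ha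
        have h3 := sw_excl target "atari_lynx" "pecom" (by decide) (by decide) ha
        simp_all
      · by_cases hc : PySem.Str.startswith target "comx" = true
        · have h1 := sw_excl target "comx" "micro" (by decide) (by decide) hc
          have h2 := sw_excl target "comx" "pecom" (by decide) (by decide) hc
          simp_all
        · by_cases hm : PySem.Str.startswith target "micro" = true
          · have h1 := sw_excl target "micro" "pecom" (by decide) (by decide) hm
            simp_all
          · by_cases hp : PySem.Str.startswith target "pecom" = true
            · simp_all
            · simp_all
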